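-- pv_equiv track=rewrite | github.com/josegabjimenez/proyecto1-adaII | FuerzaBruta.py | obtener_combinaciones
-- ===== SOURCE A (Python) =====
-- def obtener_combinaciones(ofertas, acciones_disponibles):
--
--     """
--     Función que genera todas las posibles combinaciones de compras que satisfacen las restricciones de cada comprador,
--     donde cada comprador solo puede llevar un número fijo de acciones.
--     """
--     resultados = []
--     n = len(ofertas)
--
--     # Caso base: si ya se han considerado todos los compradores, se devuelve una lista vacía
--     if n == 0:
--         return [[]]
--
--     if n == 1:
--         return [[acciones_disponibles]]
--
--     # Se generan todas las posibles compras que puede hacer el comprador actual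
--     posibles_acciones = [0, ofertas[0][1]]
--
--     # Se itera sobre todas las posibles compras del comprador actual
--     for i in range(len(posibles_acciones)):
--         if posibles_acciones[i] <= acciones_disponibles:
--             # Se llama a la función recursivamente para los demás compradores y se actualiza la cantidad de acciones disponibles
--             acciones_restantes = acciones_disponibles - posibles_acciones[i]
--             compradores_restantes = obtener_combinaciones(ofertas[1:], acciones_restantes)
--
--             # Se combinan todas las posibles compras del comprador actual con todas las posibles compras de los demás compradores
--             for j in range(len(compradores_restantes)):
--                 resultado = [posibles_acciones[i]] + compradores_restantes[j]
--                 resultados.append(resultado)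
--
--     return resultados
-- ===== SOURCE B (Python) =====
-- def obtener_combinaciones(ofertas, acciones_disponibles):
--     """Iterative worklist version: expands (prefix, remaining) states buyer by buyer."""
--     n = len(ofertas)
--     if n == 0:
--         return [[]]
--     if n == 1:
--         return [[acciones_disponibles]]
--     states = [([], acciones_disponibles)]
--     for _, cantidad in ofertas[:-1]:
--         new_states = []
--         for prefix, remaining in states:
--             for c in (0, cantidad):
--                 if c <= remaining:
--                     new_states.append((prefix + [c], remaining - c))
--         states = new_states
--     return [prefix + [remaining] for prefix, remaining in states]
-- ===== Notes on version B (the rewrite author's own statement) =====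
-- stated objective: alternative
-- what changed: Replaces the recursion (with list-slicing and per-call concatenation of sub-results) by an iterative breadth-first worklist of (prefix, remaining) states expanded buyer by buyer, finalized by appending the leftover shares for the last buyer.
import Mathlib
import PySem

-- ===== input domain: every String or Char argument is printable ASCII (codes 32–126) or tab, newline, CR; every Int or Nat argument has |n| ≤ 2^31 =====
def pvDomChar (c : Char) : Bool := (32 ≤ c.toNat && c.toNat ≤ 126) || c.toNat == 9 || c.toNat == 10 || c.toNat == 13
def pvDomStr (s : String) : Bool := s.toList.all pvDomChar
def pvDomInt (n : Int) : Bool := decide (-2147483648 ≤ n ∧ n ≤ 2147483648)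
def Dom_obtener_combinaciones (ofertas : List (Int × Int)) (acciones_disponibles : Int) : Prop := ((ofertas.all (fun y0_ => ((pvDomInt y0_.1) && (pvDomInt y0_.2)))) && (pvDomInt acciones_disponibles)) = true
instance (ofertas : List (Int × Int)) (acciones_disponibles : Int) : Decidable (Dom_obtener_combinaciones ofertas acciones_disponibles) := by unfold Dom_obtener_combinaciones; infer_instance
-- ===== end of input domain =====

-- B replaces A's recursion by an iterative worklist of (prefix, remaining) states (alternative decomposition, same cost).

-- ===== PORT A =====
-- literal transliteration of A: base cases n=0/n=1, then for each choice in [0, ofertas[0][1]]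
-- with guard choice ≤ disponibles, recurse on ofertas[1:] and append prefixed results.
def obtener_combinaciones (ofertas : List (Int × Int)) (acciones_disponibles : Int) : List (List Int) :=
  match ofertas with
  | [] => [[]]
  | [_] => [[acciones_disponibles]]
  | o :: rest =>
      let posibles_acciones : List Int := [0, o.2]
      posibles_acciones.foldl
        (fun resultados c =>
          if c ≤ acciones_disponibles then
            resultados ++ (obtener_combinaciones rest (acciones_disponibles - c)).map (fun t => c :: t)
          else resultados)
        []

-- ===== PORT B =====
-- one buyer step of the worklist: expand each (prefix, remaining) state by the affordable choices
def pvStep (states : List (List Int × Int)) (oferta : Int × Int) : List (List Int × Int) :=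
  states.foldl
    (fun new_states s =>
      [0, oferta.2].foldl
        (fun acc c => if c ≤ s.2 then acc ++ [(s.1 ++ [c], s.2 - c)] else acc)
        new_states)
    []

def obtener_combinaciones_alt (ofertas : List (Int × Int)) (acciones_disponibles : Int) : List (List Int) :=
  if ofertas.length = 0 then [[]]
  else if ofertas.length = 1 then [[acciones_disponibles]]
  else
    let states := ofertas.dropLast.foldl pvStep [([], acciones_disponibles)]
    states.map (fun s => s.1 ++ [s.2])

-- ===== PRECONDITION & SPEC =====
def Spec_obtener_combinaciones (ofertas : List (Int × Int)) (acciones_disponibles : Int) (out : List (List Int)) : Prop := out = obtener_combinaciones_alt ofertas acciones_disponibles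
instance (ofertas : List (Int × Int)) (acciones_disponibles : Int) (out : List (List Int)) : Decidable (Spec_obtener_combinaciones ofertas acciones_disponibles out) := by unfold Spec_obtener_combinaciones; infer_instance

-- ===== CLAIM (what is proved, stated in full; the proofs are below) =====
def Claim_equal_obtener_combinaciones : Prop := ∀ (ofertas : List (Int × Int)) (acciones_disponibles : Int), Dom_obtener_combinaciones ofertas acciones_disponibles → Spec_obtener_combinaciones ofertas acciones_disponibles (obtener_combinaciones ofertas acciones_disponibles)

-- ===== LEMMAS AND PROOFS =====

-- flatMap of singletons is a map
theorem pv_flatMap_singleton {A B : Type} (f : A → B) (l : List A) :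
    l.flatMap (fun x => [f x]) = l.map f := by
  induction l with
  | nil => rfl
  | cons a l ih => simp [List.flatMap_cons, ih]

-- 'if p(x): out += g(x)' loop shape
theorem pv_foldl_if_extend {A B : Type} (p : A → Prop) [DecidablePred p] (g : A → List B)
    (l : List A) (acc : List B) :
    l.foldl (fun a c => if p c then a ++ g c else a) acc
      = acc ++ (l.filter (fun c => decide (p c))).flatMap g := by
  induction l generalizing acc with
  | nil => simp
  | cons c l ih =>
      simp only [List.foldl_cons, List.filter_cons]
      by_cases h : p c <;> simp [h, ih, List.append_assoc]

-- A's choice loop, in flatMap form (for a nonempty tail of buyers)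
theorem obtener_cons (o : Int × Int) (rest : List (Int × Int)) (h : rest ≠ []) (d : Int) :
    obtener_combinaciones (o :: rest) d
      = ([(0:Int), o.2].filter (fun c => decide (c ≤ d))).flatMap
          (fun c => (obtener_combinaciones rest (d - c)).map (fun t => c :: t)) := by
  cases rest with
  | nil => exact absurd rfl h
  | cons p rs =>
      show List.foldl _ [] _ = _
      rw [pv_foldl_if_extend (p := fun c => c ≤ d)
            (g := fun c => (obtener_combinaciones (p :: rs) (d - c)).map (fun t => c :: t))]
      simp

theorem pvStep_eq (states : List (List Int × Int)) (o : Int × Int) :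
    pvStep states o
      = states.flatMap (fun s =>
          ([(0:Int), o.2].filter (fun c => decide (c ≤ s.2))).map (fun c => (s.1 ++ [c], s.2 - c))) := by
  unfold pvStep
  have h : ∀ (init : List (List Int × Int)),
      states.foldl (fun new_states s =>
        [0, o.2].foldl (fun acc c => if c ≤ s.2 then acc ++ [(s.1 ++ [c], s.2 - c)] else acc) new_states) init
      = init ++ states.flatMap (fun s =>
          ([(0:Int), o.2].filter (fun c => decide (c ≤ s.2))).map (fun c => (s.1 ++ [c], s.2 - c))) := by
    induction states with
    | nil => simp
    | cons s ss ih =>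
        intro init
        rw [List.foldl_cons, ih, pv_foldl_if_extend (p := fun c => c ≤ s.2) (g := fun c => [(s.1 ++ [c], s.2 - c)])]
        simp [List.append_assoc, pv_flatMap_singleton]
  simpa using h []

-- key invariant: finalizing the worklist after processing buyers l equals distributing A's
-- recursive result for l ++ [x] (A ignores the last buyer's offer x) over each pending state
theorem pv_key (l : List (Int × Int)) (x : Int × Int) (states : List (List Int × Int)) :
    (l.foldl pvStep states).map (fun s => s.1 ++ [s.2])
      = states.flatMap (fun s => (obtener_combinaciones (l ++ [x]) s.2).map (fun t => s.1 ++ t)) := by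
  induction l generalizing states with
  | nil =>
      simp [obtener_combinaciones, pv_flatMap_singleton]
  | cons o l' ih =>
      simp only [List.foldl_cons, List.cons_append]
      rw [ih, pvStep_eq, List.flatMap_assoc]
      refine List.flatMap_congr (fun s _ => ?_)
      rw [obtener_cons o (l' ++ [x]) (by simp) s.2]
      simp [List.map_flatMap, List.flatMap_map, List.map_map, Function.comp_def, List.append_assoc]

-- ===== VERDICT (by name: the statement is the Claim_ definition above) =====
theorem obtener_combinaciones_spec : Claim_equal_obtener_combinaciones := by
  intro ofertas d _
  show obtener_combinaciones ofertas d = obtener_combinaciones_alt ofertas d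
  match ofertas with
  | [] => rfl
  | [_] => rfl
  | o :: p :: rest =>
      have halt : obtener_combinaciones_alt (o :: p :: rest) d
          = ((o :: p :: rest).dropLast.foldl pvStep [([], d)]).map (fun s => s.1 ++ [s.2]) := by
        simp [obtener_combinaciones_alt]
      rw [halt, pv_key ((o :: p :: rest).dropLast) ((o :: p :: rest).getLast (by simp)) [([], d)],
          List.dropLast_append_getLast (by simp)]
      simp
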